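-- pv_equiv track=rewrite | github.com/IncognitoPeter/informatyka_korki | moduł_4_tablice/zestaw_1/zadania_2D.py | najdluzszy_fibonacci
-- ===== SOURCE A (Python) =====
-- def najdluzszy_fibonacci(tablica):
--     fib = [1, 1]
--     while fib[-1] < max(tablica):
--         fib.append(fib[-1] + fib[-2])
--     max_dlugosc = 0
--     poczatek = 0
--     dlugosc = 0
--     for i in range(len(tablica)):
--         if tablica[i] in fib:
--             dlugosc += 1
--             if dlugosc > max_dlugosc:
--                 max_dlugosc = dlugosc
--                 poczatek = i
--         else:
--             dlugosc = 0
--     return max_dlugosc, poczatek-max_dlugosc+1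
-- ===== SOURCE B (Python) =====
-- def najdluzszy_fibonacci(tablica):
--     fib = [1, 1]
--     while fib[-1] < max(tablica):
--         fib.append(fib[-1] + fib[-2])
--     fibset = set(fib)
--     best = 0
--     end = 0
--     n = len(tablica)
--     i = 0
--     while i < n:
--         k = tablica[i] in fibset
--         j = i + 1
--         while j < n and (tablica[j] in fibset) == k:
--             j += 1
--         dl = j - i
--         if k and dl > best:
--             best = dl
--             end = j - 1
--         i = j
--     return best, end - best + 1
-- ===== Notes on version B (the rewrite author's own statement) =====
-- stated objective: alternative
-- what changed: Replaces A's per-element run counter (dlugosc/max_dlugosc updated at every index) by a two-pointer scan that jumps over whole maximal runs of equal fib-membership, recording a run's length and end index once per run, with membership in a set instead of A's list scan.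
import Mathlib
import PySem

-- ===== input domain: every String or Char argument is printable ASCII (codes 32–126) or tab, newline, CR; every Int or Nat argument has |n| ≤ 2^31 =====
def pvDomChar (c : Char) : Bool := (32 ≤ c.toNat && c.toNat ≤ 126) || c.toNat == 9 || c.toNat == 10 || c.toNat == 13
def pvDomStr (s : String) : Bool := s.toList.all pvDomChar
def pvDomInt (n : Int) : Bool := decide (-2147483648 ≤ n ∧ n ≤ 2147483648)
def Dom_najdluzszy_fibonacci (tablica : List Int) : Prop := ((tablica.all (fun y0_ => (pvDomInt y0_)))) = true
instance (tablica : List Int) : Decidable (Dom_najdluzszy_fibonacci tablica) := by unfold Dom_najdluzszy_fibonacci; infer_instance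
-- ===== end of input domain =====

-- B replaces A's per-element run counter by a two-pointer scan over maximal runs of
-- equal fib-membership (set membership instead of a list scan); same results, alternative decomposition.


-- ===== PORT A =====
-- shared helper: both Pythons build fib with the identical `while fib[-1] < max(tablica)` loop
-- (the 1 ≤ a, 1 ≤ b arguments only justify termination; fib entries stay ≥ 1)
def buildFib (m : Int) (a b : Int) (acc : List Int) (ha : 1 ≤ a) (hb : 1 ≤ b) : List Int :=
  if b < m then buildFib m b (a + b) (acc ++ [a + b]) hb (by omega) else acc
termination_by (m - b).toNat
decreasing_by omega

-- one step of A's `for i in range(len(tablica))` loop; state = (max_dlugosc, poczatek, dlugosc, i)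
def stepA (fib : List Int) (s : Int × Int × Int × Int) (x : Int) : Int × Int × Int × Int :=
  if fib.contains x then
    if s.2.2.1 + 1 > s.1 then (s.2.2.1 + 1, s.2.2.2, s.2.2.1 + 1, s.2.2.2 + 1)
    else (s.1, s.2.1, s.2.2.1 + 1, s.2.2.2 + 1)
  else (s.1, s.2.1, 0, s.2.2.2 + 1)

def najdluzszy_fibonacci (tablica : List Int) : Int × Int :=
  let m := (PySem.List.max? tablica (fun x => x)).getD 0
  let fib := buildFib m 1 1 [1, 1] (by norm_num) (by norm_num)
  let s := tablica.foldl (stepA fib) (0, 0, 0, 0)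
  (s.1, s.2.1 - s.1 + 1)

-- ===== PORT B =====
-- B's outer while: consume one maximal run of equal membership per iteration;
-- (best, endi, off) = (best, end, global index i)
def altLoop (f : Int → Bool) (xs : List Int) (best endi off : Int) : Int × Int :=
  match xs with
  | [] => (best, endi)
  | x :: rest =>
    let k := f x
    let run := List.takeWhile (fun y => f y == k) (x :: rest)
    let rest' := List.dropWhile (fun y => f y == k) (x :: rest)
    let L : Int := run.length
    if k && decide (best < L) then altLoop f rest' L (off + L - 1) (off + L)
    else altLoop f rest' best endi (off + L)
termination_by xs.length
decreasing_by
  all_goals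
    simp only [List.dropWhile_cons, beq_self_eq_true, if_pos, List.length_cons]
    exact Nat.lt_succ_of_le (List.length_dropWhile_le _ _)

def najdluzszy_fibonacci_alt (tablica : List Int) : Int × Int :=
  let m := (PySem.List.max? tablica (fun x => x)).getD 0
  let fib := buildFib m 1 1 [1, 1] (by norm_num) (by norm_num)
  let fibset := PySem.Set.ofList fib
  let r := altLoop (fun x => PySem.Set.contains fibset x) tablica 0 0 0
  (r.1, r.2 - r.1 + 1)

-- ===== PRECONDITION & SPEC =====
-- Pre_ excludes only the empty list, on which Python's max(tablica) raises ValueError (in both A and B).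
def Pre_najdluzszy_fibonacci (tablica : List Int) : Prop := tablica ≠ []
instance (tablica : List Int) : Decidable (Pre_najdluzszy_fibonacci tablica) := by unfold Pre_najdluzszy_fibonacci; infer_instance

def pvWitness_najdluzszy_fibonacci : List Int := [4, 1, 2, 3, 7]

def Spec_najdluzszy_fibonacci (tablica : List Int) (out : Int × Int) : Prop := out = najdluzszy_fibonacci_alt tablica
instance (tablica : List Int) (out : Int × Int) : Decidable (Spec_najdluzszy_fibonacci tablica out) := by unfold Spec_najdluzszy_fibonacci; infer_instance

-- ===== CLAIM (what is proved, stated in full; the proofs are below) =====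
def Claim_equal_najdluzszy_fibonacci : Prop := ∀ (tablica : List Int), Dom_najdluzszy_fibonacci tablica → Pre_najdluzszy_fibonacci tablica → Spec_najdluzszy_fibonacci tablica (najdluzszy_fibonacci tablica)

-- ===== LEMMAS AND PROOFS =====

-- A's loop over a run of non-fib elements: resets dlugosc, leaves best/poczatek alone
theorem foldA_false (fib : List Int) (ys : List Int) (h : ∀ y ∈ ys, fib.contains y = false) :
    ∀ md p d i, List.foldl (stepA fib) (md, p, d, i) ys =
      (md, p, if ys.isEmpty then d else 0, i + (ys.length : Int)) := by
  induction ys with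
  | nil => intro md p d i; simp
  | cons y ys ih =>
    intro md p d i
    have hy : fib.contains y = false := h y (by simp)
    have hrest : ∀ z ∈ ys, fib.contains z = false := fun z hz => h z (by simp [hz])
    simp only [List.foldl_cons, stepA, hy, Bool.false_eq_true, if_false]
    rw [ih hrest]
    rcases ys with _ | ⟨z, zs⟩
    all_goals simp
    all_goals omega

-- A's loop over a run of fib elements (d ≤ md invariant): extends dlugosc by the run length,
-- updates best/poczatek exactly when the run beats md
theorem foldA_true (fib : List Int) (ys : List Int) (h : ∀ y ∈ ys, fib.contains y = true) :
    ∀ md p d i, d ≤ md → List.foldl (stepA fib) (md, p, d, i) ys =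
      (if md < d + (ys.length : Int) then d + (ys.length : Int) else md,
       if md < d + (ys.length : Int) then i + (ys.length : Int) - 1 else p,
       d + (ys.length : Int), i + (ys.length : Int)) := by
  induction ys with
  | nil => intro md p d i hd; simp; omega
  | cons y ys ih =>
    intro md p d i hd
    have hy : fib.contains y = true := h y (by simp)
    have hrest : ∀ z ∈ ys, fib.contains z = true := fun z hz => h z (by simp [hz])
    simp only [List.foldl_cons, stepA, hy, if_pos, List.length_cons]
    by_cases hc : d + 1 > md
    · rw [if_pos hc, ih hrest (d + 1) i (d + 1) (i + 1) le_rfl]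
      have hL : (0:Int) ≤ (ys.length : Int) := by positivity
      push_cast
      refine Prod.ext ?_ (Prod.ext ?_ (Prod.ext ?_ ?_)) <;> simp <;> (try split_ifs) <;> omega
    · rw [if_neg hc, ih hrest md p (d + 1) (i + 1) (by omega)]
      push_cast
      refine Prod.ext ?_ (Prod.ext ?_ (Prod.ext ?_ ?_)) <;> simp <;> (try split_ifs) <;> omega

theorem head_dropWhile_false {p : Int → Bool} {l : List Int} {y : Int}
    (h : (List.dropWhile p l).head? = some y) : p y = false := by
  have := List.head?_dropWhile_not p l
  rw [h] at this
  simpa using this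

-- the core correspondence: A's element-by-element fold agrees with B's run-by-run loop
theorem main_equiv (fib : List Int) : ∀ (n : Nat) (xs : List Int), xs.length = n →
    ∀ best endi off d, 0 ≤ d → d ≤ best →
    (∀ x, xs.head? = some x → fib.contains x = true → d = 0) →
    ((List.foldl (stepA fib) (best, endi, d, off) xs).1,
     (List.foldl (stepA fib) (best, endi, d, off) xs).2.1) =
      altLoop (fun x => fib.contains x) xs best endi off := by
  intro n
  induction n using Nat.strong_induction_on with
  | _ n ihn =>
    intro xs hlen best endi off d hd0nn hd hhead
    match xs with
    | [] => simp [altLoop]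
    | x :: rest =>
      rw [altLoop]
      set k := fib.contains x with hk
      set p := fun y => fib.contains y == k with hp
      have hpx : p x = true := by
        rw [hp]; show (fib.contains x == k) = true; rw [← hk, beq_self_eq_true]
      have hrun : List.takeWhile p (x :: rest) = x :: List.takeWhile p rest := by
        simp [hpx]
      have hsplit : List.takeWhile p (x :: rest) ++ List.dropWhile p (x :: rest) = x :: rest :=
        List.takeWhile_append_dropWhile
      have hrunmem : ∀ y ∈ List.takeWhile p (x :: rest), fib.contains y = k := by
        intro y hy
        have h1 : p y = true := List.mem_takeWhile_imp hy
        rw [hp] at h1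
        exact eq_of_beq h1
      have hdrop_len : (List.dropWhile p (x :: rest)).length < (x :: rest).length := by
        simp only [List.dropWhile_cons, hpx, if_pos, List.length_cons]
        exact Nat.lt_succ_of_le (List.length_dropWhile_le _ _)
      have hfold : List.foldl (stepA fib) (best, endi, d, off) (x :: rest) =
          List.foldl (stepA fib) (List.foldl (stepA fib) (best, endi, d, off)
            (List.takeWhile p (x :: rest))) (List.dropWhile p (x :: rest)) := by
        conv_lhs => rw [← hsplit]
        rw [List.foldl_append]
      have hLpos : 0 < (List.takeWhile p (x :: rest)).length := by rw [hrun]; simp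
      have hnextfalse : ∀ y, (List.dropWhile p (x :: rest)).head? = some y → fib.contains y ≠ k := by
        intro y hy
        have h2 := head_dropWhile_false hy
        rw [hp] at h2
        simpa using h2
      set L : Int := ((List.takeWhile p (x :: rest)).length : Int) with hL
      have hLpos' : 0 < L := by rw [hL]; exact_mod_cast hLpos
      rcases Bool.eq_false_or_eq_true k with hkt | hkf
      · -- k = true : a fib run; d = 0 at its start
        have hd0 : d = 0 := hhead x rfl (by rw [← hk, hkt])
        have hall : ∀ y ∈ List.takeWhile p (x :: rest), fib.contains y = true := by
          intro y hy; rw [hrunmem y hy, hkt]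
        rw [hfold, hd0, foldA_true fib _ hall best endi 0 off (by omega), hkt]
        simp only [Bool.true_and, zero_add]
        by_cases hbl : best < L
        · rw [if_pos hbl, if_pos hbl, if_pos (by simpa using hbl)]
          refine ihn _ (by omega) _ rfl L (off + L - 1) (off + L) L (by omega) le_rfl ?_
          intro y hy hcy
          exact absurd hcy (by rw [hkt] at hnextfalse; exact hnextfalse y hy)
        · rw [if_neg hbl, if_neg hbl, if_neg (by simpa using hbl)]
          refine ihn _ (by omega) _ rfl best endi (off + L) L (by omega) (by omega) ?_
          intro y hy hcy
          exact absurd hcy (by rw [hkt] at hnextfalse; exact hnextfalse y hy)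
      · -- k = false : a non-fib run; dlugosc resets to 0
        have hall : ∀ y ∈ List.takeWhile p (x :: rest), fib.contains y = false := by
          intro y hy; rw [hrunmem y hy, hkf]
        rw [hfold, foldA_false fib _ hall best endi d off]
        have hne : (List.takeWhile p (x :: rest)).isEmpty = false := by rw [hrun]; simp
        rw [hne, hkf]
        simp only [Bool.false_eq_true, if_false, Bool.false_and]
        refine ihn _ (by omega) _ rfl best endi (off + L) 0 le_rfl (by omega) ?_
        intro y hy hcy
        rfl

theorem set_contains_eq (fib : List Int) :
    (fun x => PySem.Set.contains (PySem.Set.ofList fib) x) = (fun x => fib.contains x) := by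
  funext x
  rcases h : fib.contains x with hf | ht
  · simp only [Bool.eq_false_iff]
    intro hc
    have : x ∈ PySem.Set.ofList fib := by
      simpa [PySem.Set.contains_iff] using hc
    rw [PySem.Set.mem_ofList] at this
    simp at h
    exact h this
  · have : x ∈ PySem.Set.ofList fib := by
      rw [PySem.Set.mem_ofList]
      simpa [List.contains_iff_mem] using h
    simpa [PySem.Set.contains_iff] using this

-- ===== VERDICT (by name: the statement is the Claim_ definition above) =====
theorem najdluzszy_fibonacci_spec : Claim_equal_najdluzszy_fibonacci := by
  intro tablica _ _
  unfold Spec_najdluzszy_fibonacci najdluzszy_fibonacci najdluzszy_fibonacci_alt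
  simp only [set_contains_eq]
  rw [← main_equiv _ tablica.length tablica rfl 0 0 0 0 le_rfl le_rfl (fun _ _ _ => rfl)]
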